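-- pv_equiv track=rewrite | github.com/neiomi1/Ur_main | Ur_main.py | check_tile
-- ===== SOURCE A (Python) =====
-- def check_tile(coordinates):
--     if coordinates[1] < 86 and 9*86 > coordinates[0] >= 1*86:
--         return -1
--     elif 3*86 > coordinates[1] >= 2*86:
--         if 5*86 > coordinates[0] >= 4*86:
--             return 20
--         elif 4*86 > coordinates[0]:
--             for n in range(3, 5):
--                 if n * 86 > coordinates[0] >= (n-1)*86:
--                     return n - 2
--         elif 10*86 > coordinates[0] >= 6*86:
--             for n in range(7, 11):
--                 if n*86 > coordinates[0] >= (n-1)*86: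
--                     return n - 4
--         else:
--             pass
--     elif 4*86 > coordinates[1] >= 3*86:
--         if 11*86 > coordinates[0] >= 2*86:
--             for n in range(3, 11):
--                 if n*86 > coordinates[0] >= (n-1)*86:
--                     return n + 4
--         else:
--             pass
--     elif 5*86 > coordinates[1] >= 4*86:
--         if 5 * 86 > coordinates[0] >= 4 * 86:
--             return 21
--         elif 4 * 86 > coordinates[0]:
--             for n in range(3, 5):
--                 if n * 86 > coordinates[0] >= (n - 1) * 86:
--                     return n + 12
--         elif 10 * 86 > coordinates[0] >= 6 * 86:
--             for n in range(7, 11):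
--                 if n * 86 > coordinates[0] >= (n - 1) * 86:
--                     return n + 10
--         else:
--             pass
--     elif 7*86 > coordinates[1] >= 6*86 and 11*86 > coordinates[0] >= 2*86:
--         return -2
--     else:
--         pass
-- ===== SOURCE B (Python) =====
-- def check_tile(coordinates):
--     x, y = coordinates[0], coordinates[1]
--     if y < 86:
--         return -1 if 86 <= x < 9 * 86 else None
--     r, c = y // 86, x // 86
--     if r == 6:
--         return -2 if 2 <= c <= 10 else None
--     if r not in (2, 3, 4) or not 2 <= c <= 9:
--         return None
--     if r == 3:
--         return c + 5
--     # r is 2 or 4: the side rows, with a gap at column band 5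
--     if c == 5:
--         return None
--     if c == 4:
--         return 20 if r == 2 else 21
--     base = c - 1 if c < 4 else c - 3
--     return base if r == 2 else base + 14
-- ===== Notes on version B (the rewrite author's own statement) =====
-- stated objective: simpler
-- what changed: Replaces the nested if/elif ladder with inner bounded search loops by two floor divisions (row and column band) and a direct arithmetic case analysis on the band pair.
import Mathlib
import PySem

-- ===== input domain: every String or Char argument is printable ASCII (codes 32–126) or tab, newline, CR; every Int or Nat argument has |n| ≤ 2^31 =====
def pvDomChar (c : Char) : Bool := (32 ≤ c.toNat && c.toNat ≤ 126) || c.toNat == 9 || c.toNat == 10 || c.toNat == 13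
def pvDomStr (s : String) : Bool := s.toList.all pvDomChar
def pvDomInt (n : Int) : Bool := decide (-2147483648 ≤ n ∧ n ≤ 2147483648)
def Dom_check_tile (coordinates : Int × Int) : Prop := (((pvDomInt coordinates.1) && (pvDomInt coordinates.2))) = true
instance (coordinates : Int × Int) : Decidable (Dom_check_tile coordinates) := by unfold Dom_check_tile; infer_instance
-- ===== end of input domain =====

-- B replaces A's nested if/elif ladder with inner scan loops by two floor divisions and a
-- small arithmetic case analysis on the (row band, column band) pair; objective: simpler.

-- ===== PORT A =====
-- the 'for n in range(a,b): if n*86 > x >= (n-1)*86: return f n' loops of A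
def check_tile_loopA (x : Int) (f : Int → Int) : List Int → Option Int
  | [] => none
  | n :: rest =>
    if n * 86 > x ∧ x ≥ (n - 1) * 86 then some (f n) else check_tile_loopA x f rest

def check_tile (coordinates : Int × Int) : Option Int :=
  let x := coordinates.1
  let y := coordinates.2
  if y < 86 ∧ 9 * 86 > x ∧ x ≥ 1 * 86 then some (-1)
  else if 3 * 86 > y ∧ y ≥ 2 * 86 then
    if 5 * 86 > x ∧ x ≥ 4 * 86 then some 20
    else if 4 * 86 > x then check_tile_loopA x (fun n => n - 2) (PySem.List.pyRange 3 5 1)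
    else if 10 * 86 > x ∧ x ≥ 6 * 86 then check_tile_loopA x (fun n => n - 4) (PySem.List.pyRange 7 11 1)
    else none
  else if 4 * 86 > y ∧ y ≥ 3 * 86 then
    if 11 * 86 > x ∧ x ≥ 2 * 86 then check_tile_loopA x (fun n => n + 4) (PySem.List.pyRange 3 11 1)
    else none
  else if 5 * 86 > y ∧ y ≥ 4 * 86 then
    if 5 * 86 > x ∧ x ≥ 4 * 86 then some 21
    else if 4 * 86 > x then check_tile_loopA x (fun n => n + 12) (PySem.List.pyRange 3 5 1)
    else if 10 * 86 > x ∧ x ≥ 6 * 86 then check_tile_loopA x (fun n => n + 10) (PySem.List.pyRange 7 11 1)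
    else none
  else if 7 * 86 > y ∧ y ≥ 6 * 86 ∧ 11 * 86 > x ∧ x ≥ 2 * 86 then some (-2)
  else none

-- ===== PORT B =====
def check_tile_alt (coordinates : Int × Int) : Option Int :=
  let x := coordinates.1
  let y := coordinates.2
  if y < 86 then (if 86 ≤ x ∧ x < 9 * 86 then some (-1) else none)
  else
    let r := PySem.Int.floordiv y 86
    let c := PySem.Int.floordiv x 86
    if r = 6 then (if 2 ≤ c ∧ c ≤ 10 then some (-2) else none)
    else if ¬ (r = 2 ∨ r = 3 ∨ r = 4) ∨ ¬ (2 ≤ c ∧ c ≤ 9) then none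
    else if r = 3 then some (c + 5)
    else if c = 5 then none
    else if c = 4 then (if r = 2 then some 20 else some 21)
    else
      let base := if c < 4 then c - 1 else c - 3
      if r = 2 then some base else some (base + 14)

-- ===== PRECONDITION & SPEC =====
def Spec_check_tile (coordinates : Int × Int) (out : Option Int) : Prop := out = check_tile_alt coordinates
instance (coordinates : Int × Int) (out : Option Int) : Decidable (Spec_check_tile coordinates out) := by unfold Spec_check_tile; infer_instance

-- ===== CLAIM (what is proved, stated in full; the proofs are below) =====
def Claim_equal_check_tile : Prop := ∀ (coordinates : Int × Int), Dom_check_tile coordinates → Spec_check_tile coordinates (check_tile coordinates)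

-- ===== LEMMAS AND PROOFS =====

theorem check_tile_fdiv_bounds (y q : Int) (h : PySem.Int.floordiv y 86 = q) :
    q * 86 ≤ y ∧ y < (q + 1) * 86 := by
  rw [PySem.Int.floordiv_eq_iff_of_pos (by norm_num)] at h
  exact h

-- ===== VERDICT (by name: the statement is the Claim_ definition above) =====
set_option maxHeartbeats 1000000 in
theorem check_tile_spec : Claim_equal_check_tile := by
  intro ⟨x, y⟩ _
  unfold Spec_check_tile check_tile check_tile_alt
  have hr := check_tile_fdiv_bounds y (PySem.Int.floordiv y 86) rfl
  have hc := check_tile_fdiv_bounds x (PySem.Int.floordiv x 86) rfl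
  have h35 : PySem.List.pyRange 3 5 1 = [3, 4] := by decide
  have h711 : PySem.List.pyRange 7 11 1 = [7, 8, 9, 10] := by decide
  have h311 : PySem.List.pyRange 3 11 1 = [3, 4, 5, 6, 7, 8, 9, 10] := by decide
  simp only [h35, h711, h311, check_tile_loopA]
  generalize PySem.Int.floordiv y 86 = r at hr ⊢
  generalize PySem.Int.floordiv x 86 = c at hc ⊢
  by_cases hy : y < 86
  · -- row band below the board: only the top-row special case can fire
    rw [if_pos hy, if_neg (show ¬(3 * 86 > y ∧ y ≥ 2 * 86) by omega),
        if_neg (show ¬(4 * 86 > y ∧ y ≥ 3 * 86) by omega),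
        if_neg (show ¬(5 * 86 > y ∧ y ≥ 4 * 86) by omega),
        if_neg (show ¬(7 * 86 > y ∧ y ≥ 6 * 86 ∧ 11 * 86 > x ∧ x ≥ 2 * 86) by omega)]
    split_ifs <;> first | rfl | omega
  · rw [if_neg (show ¬(y < 86 ∧ 9 * 86 > x ∧ x ≥ 1 * 86) by omega), if_neg hy]
    by_cases hr2 : r = 2
    · rw [if_pos (show 3 * 86 > y ∧ y ≥ 2 * 86 by omega),
          if_neg (show r ≠ 6 by omega)]
      split_ifs <;> first | rfl | omega | (congr 1; omega)
    · rw [if_neg (show ¬(3 * 86 > y ∧ y ≥ 2 * 86) by omega)]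
      by_cases hr3 : r = 3
      · rw [if_pos (show 4 * 86 > y ∧ y ≥ 3 * 86 by omega),
            if_neg (show r ≠ 6 by omega)]
        split_ifs <;> first | rfl | omega | (congr 1; omega)
      · rw [if_neg (show ¬(4 * 86 > y ∧ y ≥ 3 * 86) by omega)]
        by_cases hr4 : r = 4
        · rw [if_pos (show 5 * 86 > y ∧ y ≥ 4 * 86 by omega),
              if_neg (show r ≠ 6 by omega)]
          split_ifs <;> first | rfl | omega | (congr 1; omega)
        · rw [if_neg (show ¬(5 * 86 > y ∧ y ≥ 4 * 86) by omega)]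
          by_cases hr6 : r = 6
          · rw [if_pos hr6]
            split_ifs <;> first | rfl | omega
          · rw [if_neg (show ¬(7 * 86 > y ∧ y ≥ 6 * 86 ∧ 11 * 86 > x ∧ x ≥ 2 * 86) by omega),
                if_neg hr6,
                if_pos (show ¬(r = 2 ∨ r = 3 ∨ r = 4) ∨ ¬(2 ≤ c ∧ c ≤ 9) from Or.inl (by omega))]
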